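-- pv_equiv track=rewrite | github.com/cebrametamex/cebrameta | backend/tests/test_pipeline.py | create_test_image
-- ===== SOURCE A (Python) =====
-- def create_test_image(size: int = 64) -> list[list[int]]:
--     return [
--         [
--             255 if size // 4 <= x < 3 * size // 4 and size // 4 <= y < 3 * size // 4 else 0
--             for x in range(size)
--         ]
--         for y in range(size)
--     ]
-- ===== SOURCE B (Python) =====
-- def create_test_image(size: int = 64) -> list[list[int]]:
--     lo = size // 4
--     hi = 3 * size // 4
--     inside = [0] * lo + [255] * (hi - lo) + [0] * (size - hi)
--     outside = [0] * size
--     return [list(inside) if lo <= y < hi else list(outside) for y in range(size)]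
-- ===== Notes on version B (the rewrite author's own statement) =====
-- stated objective: simpler
-- what changed: Computes lo/hi once and builds each row from three constant segments ([0]*lo + [255]*(hi-lo) + [0]*(size-hi)) chosen by a single per-row test, instead of evaluating the four-way bound conditional at every cell.
import Mathlib
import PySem

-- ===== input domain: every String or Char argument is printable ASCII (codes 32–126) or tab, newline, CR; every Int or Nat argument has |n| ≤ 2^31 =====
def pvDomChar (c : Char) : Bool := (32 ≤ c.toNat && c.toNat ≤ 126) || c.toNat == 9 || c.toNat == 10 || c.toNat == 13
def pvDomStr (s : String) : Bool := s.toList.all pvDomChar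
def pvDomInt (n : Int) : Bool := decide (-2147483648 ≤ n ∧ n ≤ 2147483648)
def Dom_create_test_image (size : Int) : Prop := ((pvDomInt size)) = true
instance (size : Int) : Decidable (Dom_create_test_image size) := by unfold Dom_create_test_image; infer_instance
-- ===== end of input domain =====

-- B builds each row from three constant segments chosen by one per-row test, instead of a per-cell conditional (objective: simpler).

-- ===== PORT A =====
def create_test_image (size : Int) : List (List Int) :=
  (PySem.List.pyRange 0 size 1).map (fun y =>
    (PySem.List.pyRange 0 size 1).map (fun x =>
      if PySem.Int.floordiv size 4 ≤ x ∧ x < PySem.Int.floordiv (3 * size) 4 ∧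
         PySem.Int.floordiv size 4 ≤ y ∧ y < PySem.Int.floordiv (3 * size) 4
      then (255 : Int) else 0))

-- ===== PORT B =====
def create_test_image_alt (size : Int) : List (List Int) :=
  let lo := PySem.Int.floordiv size 4
  let hi := PySem.Int.floordiv (3 * size) 4
  let inside : List Int :=
    List.replicate lo.toNat 0 ++ (List.replicate (hi - lo).toNat 255 ++ List.replicate (size - hi).toNat 0)
  let outside : List Int := List.replicate size.toNat 0
  (PySem.List.pyRange 0 size 1).map (fun y => if lo ≤ y ∧ y < hi then inside else outside)

-- ===== PRECONDITION & SPEC =====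
def Spec_create_test_image (size : Int) (out : List (List Int)) : Prop := out = create_test_image_alt size
instance (size : Int) (out : List (List Int)) : Decidable (Spec_create_test_image size out) := by unfold Spec_create_test_image; infer_instance

-- ===== CLAIM (what is proved, stated in full; the proofs are below) =====
def Claim_equal_create_test_image : Prop := ∀ (size : Int), Dom_create_test_image size → Spec_create_test_image size (create_test_image size)

-- ===== LEMMAS AND PROOFS =====

-- a map over a range whose values are constant on the range is a replicate
theorem pv_seg_const (a b c : Int) (f : Int → Int) (h : ∀ x, a ≤ x → x < b → f x = c) :
    (PySem.List.pyRange a b 1).map f = List.replicate (b - a).toNat c := by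
  have h1 : (PySem.List.pyRange a b 1).map f = (PySem.List.pyRange a b 1).map (fun _ => c) := by
    apply List.map_congr_left
    intro x hx
    rw [PySem.List.mem_pyRange_one] at hx
    exact h x hx.1 hx.2
  rw [h1, List.map_const', PySem.List.length_pyRange_one]

-- one row of A equals the corresponding segment row of B
theorem pv_row (lo hi size : Int) (P : Prop) [Decidable P]
    (h0 : 0 ≤ lo) (h1 : lo ≤ hi) (h2 : hi ≤ size) :
    (PySem.List.pyRange 0 size 1).map (fun x => if lo ≤ x ∧ x < hi ∧ P then (255 : Int) else 0) =
      if P then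
        List.replicate lo.toNat 0 ++ (List.replicate (hi - lo).toNat 255 ++ List.replicate (size - hi).toNat 0)
      else List.replicate size.toNat 0 := by
  by_cases hP : P
  · rw [if_pos hP,
      PySem.List.pyRange_one_append 0 lo size h0 (le_trans h1 h2),
      PySem.List.pyRange_one_append lo hi size h1 h2,
      List.map_append, List.map_append]
    rw [pv_seg_const 0 lo 0 _ (fun x hx1 hx2 => by rw [if_neg]; rintro ⟨h, -⟩; omega),
        pv_seg_const lo hi 255 _ (fun x hx1 hx2 => by rw [if_pos ⟨hx1, hx2, hP⟩]),
        pv_seg_const hi size 0 _ (fun x hx1 hx2 => by rw [if_neg]; rintro ⟨-, h, -⟩; omega)]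
    simp
  · rw [if_neg hP, pv_seg_const 0 size 0 _ (fun x hx1 hx2 => by simp [hP])]
    simp

-- ===== VERDICT (by name: the statement is the Claim_ definition above) =====
theorem create_test_image_spec : Claim_equal_create_test_image := by
  intro size _
  unfold Spec_create_test_image create_test_image create_test_image_alt
  by_cases hs : 0 < size
  · have hlo : 0 ≤ PySem.Int.floordiv size 4 := by
      rw [PySem.Int.floordiv_eq_ediv_of_pos (by omega)]; omega
    have hlh : PySem.Int.floordiv size 4 ≤ PySem.Int.floordiv (3 * size) 4 := by
      rw [PySem.Int.floordiv_eq_ediv_of_pos (by omega), PySem.Int.floordiv_eq_ediv_of_pos (by omega)]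
      omega
    have hhs : PySem.Int.floordiv (3 * size) 4 ≤ size := by
      rw [PySem.Int.floordiv_eq_ediv_of_pos (by omega)]; omega
    apply List.map_congr_left
    intro y _
    exact pv_row _ _ _ _ hlo hlh hhs
  · rw [PySem.List.pyRange_one_eq_nil (by omega)]
    simp
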